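-- pv_equiv track=rewrite | github.com/yongchoooon/paravoca | backend/app/agents/data_enrichment.py | _content_id_from_entity_id
-- ===== SOURCE A (Python) =====
-- from typing import Any
--
-- def _string_or_none(value: Any) -> str | None:
--     if value is None:
--         return None
--     text = str(value).strip()
--     return text or None
--
-- def _content_id_from_entity_id(value: Any) -> str | None:
--     text = _string_or_none(value)
--     if not text:
--         return None
--     for prefix in ("tourapi:content:", "entity:tourapi:content:"):
--         if text.startswith(prefix):
--             content_id = text.removeprefix(prefix).strip()
--             return content_id or None
--     return None
-- ===== SOURCE B (Python) =====
-- from typing import Any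
--
--
-- def _string_or_none(value: Any) -> str | None:
--     if value is None:
--         return None
--     text = str(value).strip()
--     return text or None
--
--
-- def _content_id_from_entity_id(value: Any) -> str | None:
--     # "entity:tourapi:content:" == "entity:" + "tourapi:content:", so strip an
--     # optional single leading "entity:" and do one prefix check instead of a loop.
--     text = _string_or_none(value)
--     if not text:
--         return None
--     rest = text.removeprefix("entity:")
--     if not rest.startswith("tourapi:content:"):
--         return None
--     return rest.removeprefix("tourapi:content:").strip() or None
-- ===== Notes on version B (the rewrite author's own statement) =====
-- stated objective: simpler
-- what changed: Replaces the loop over two candidate prefixes by stripping one optional leading 'entity:' with removeprefix and doing a single 'tourapi:content:' prefix check.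
import Mathlib
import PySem

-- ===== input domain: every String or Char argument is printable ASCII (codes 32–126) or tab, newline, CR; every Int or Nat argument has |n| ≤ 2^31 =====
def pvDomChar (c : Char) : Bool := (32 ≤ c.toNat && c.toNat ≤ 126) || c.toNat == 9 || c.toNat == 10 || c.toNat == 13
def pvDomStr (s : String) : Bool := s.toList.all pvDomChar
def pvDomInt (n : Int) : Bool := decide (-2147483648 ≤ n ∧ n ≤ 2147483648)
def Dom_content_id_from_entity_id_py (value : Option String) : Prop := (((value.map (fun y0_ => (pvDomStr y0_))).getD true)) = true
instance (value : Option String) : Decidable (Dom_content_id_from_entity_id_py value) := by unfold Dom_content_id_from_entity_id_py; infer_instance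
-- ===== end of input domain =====

-- B strips one optional leading "entity:" with removeprefix and does a single
-- "tourapi:content:" prefix check instead of A's loop over two candidate prefixes.


-- str.removeprefix, ported by hand (exact: drops the prefix once if present, else identity)
def pyRemoveprefix (s p : List Char) : List Char :=
  if p <+: s then s.drop p.length else s

-- port of _string_or_none (shared helper of Source A and Source B)
def string_or_none_py (value : Option String) : Option (List Char) :=
  match value with
  | none => none
  | some v =>
    let text := PySem.Chars.strip v.toList
    if text = [] then none else some text

-- ===== PORT A =====
def content_id_from_entity_id_py (value : Option String) : Option String :=
  match string_or_none_py value with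
  | none => none
  | some text =>
    if text = [] then none
    else
      -- the for-loop over the two prefixes, unrolled in order
      if PySem.Chars.startswith text ("tourapi:content:".toList) then
        let contentId := PySem.Chars.strip (pyRemoveprefix text ("tourapi:content:".toList))
        if contentId = [] then none else some (String.ofList contentId)
      else if PySem.Chars.startswith text ("entity:tourapi:content:".toList) then
        let contentId := PySem.Chars.strip (pyRemoveprefix text ("entity:tourapi:content:".toList))
        if contentId = [] then none else some (String.ofList contentId)
      else none

-- ===== PORT B =====
def content_id_from_entity_id_py_alt (value : Option String) : Option String :=
  match string_or_none_py value with
  | none => none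
  | some text =>
    if text = [] then none
    else
      let rest := pyRemoveprefix text ("entity:".toList)
      if PySem.Chars.startswith rest ("tourapi:content:".toList) = false then none
      else
        let cid := PySem.Chars.strip (pyRemoveprefix rest ("tourapi:content:".toList))
        if cid = [] then none else some (String.ofList cid)

-- ===== PRECONDITION & SPEC =====
def Spec_content_id_from_entity_id_py (value : Option String) (out : Option String) : Prop := out = content_id_from_entity_id_py_alt value
instance (value : Option String) (out : Option String) : Decidable (Spec_content_id_from_entity_id_py value out) := by unfold Spec_content_id_from_entity_id_py; infer_instance

-- ===== CLAIM (what is proved, stated in full; the proofs are below) =====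
def Claim_equal_content_id_from_entity_id_py : Prop := ∀ (value : Option String), Dom_content_id_from_entity_id_py value → Spec_content_id_from_entity_id_py value (content_id_from_entity_id_py value)

-- ===== LEMMAS AND PROOFS =====

-- startswith as a decidable prefix test
theorem startswith_decide (s p : List Char) :
    PySem.Chars.startswith s p = decide (p <+: s) := by
  rw [Bool.eq_iff_iff]
  simp [PySem.Chars.startswith_iff]

-- the core equality, with the two prefix pieces abstract: A checks p1 then pe ++ p1,
-- B strips an optional pe and checks p1 once
theorem core_general (p1 pe text : List Char)
    (hne : ¬ pe <+: p1) (hne' : ¬ p1 <+: pe) :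
    (if PySem.Chars.startswith text p1 then
        if PySem.Chars.strip (pyRemoveprefix text p1) = [] then none
        else some (String.ofList (PySem.Chars.strip (pyRemoveprefix text p1)))
      else if PySem.Chars.startswith text (pe ++ p1) then
        if PySem.Chars.strip (pyRemoveprefix text (pe ++ p1)) = [] then none
        else some (String.ofList (PySem.Chars.strip (pyRemoveprefix text (pe ++ p1))))
      else none)
    =
    (if PySem.Chars.startswith (pyRemoveprefix text pe) p1 = false then none
      else if PySem.Chars.strip (pyRemoveprefix (pyRemoveprefix text pe) p1) = [] then none
      else some (String.ofList (PySem.Chars.strip (pyRemoveprefix (pyRemoveprefix text pe) p1)))) := by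
  simp only [pyRemoveprefix, startswith_decide]
  by_cases h1 : p1 <+: text
  · have he : ¬ pe <+: text := fun he =>
      (List.prefix_or_prefix_of_prefix he h1).elim hne hne'
    simp [h1, he]
  · by_cases h2 : pe <+: text
    · obtain ⟨t, rfl⟩ := h2
      by_cases h3 : p1 <+: t
      · simp [h1, h3, List.prefix_append_right_inj]
      · simp [h1, h3, List.prefix_append_right_inj]
    · have h4 : ¬ (pe ++ p1) <+: text := fun h =>
        h2 ((List.prefix_append pe p1).trans h)
      simp [h1, h2, h4]

-- ===== VERDICT (by name: the statement is the Claim_ definition above) =====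
theorem content_id_from_entity_id_py_spec : Claim_equal_content_id_from_entity_id_py := by
  intro value _
  unfold Spec_content_id_from_entity_id_py content_id_from_entity_id_py content_id_from_entity_id_py_alt
  cases h : string_or_none_py value with
  | none => rfl
  | some text =>
    by_cases ht : text = []
    · simp [ht]
    · simp only [if_neg ht]
      rw [show ("entity:tourapi:content:".toList)
            = "entity:".toList ++ "tourapi:content:".toList by decide]
      exact core_general _ _ _ (by decide) (by decide)
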